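-- pv_equiv track=rewrite | github.com/ppirae/Programmers | level_2/짝지어 제거하기.py | solution
-- ===== SOURCE A (Python) =====
-- def solution(s):
--     def check(stk, ch):
--         if stk == []:
--             stk.append(ch)
--         elif stk[-1] == ch:
--             stk.pop()
--         elif stk[-1] != ch:
--             stk.append(ch)
--         return stk
--
--     s = list(s)
--     stk = []
--
--     for i in s:
--         stk = check(stk, i)
--
--     ans = 0
--     if stk == []:
--         ans = 1
--     else:
--         ans = 0
--     return ans
-- ===== SOURCE B (Python) =====
-- def solution(s):
--     chars = list(s)
--     changed = True
--     while changed: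
--         changed = False
--         out = []
--         i = 0
--         while i < len(chars):
--             if i + 1 < len(chars) and chars[i] == chars[i + 1]:
--                 i += 2
--                 changed = True
--             else:
--                 out.append(chars[i])
--                 i += 1
--         chars = out
--     return 1 if not chars else 0
-- ===== Notes on version B (the rewrite author's own statement) =====
-- stated objective: alternative
-- what changed: Replaces the one-pass stack cancellation with a fixpoint loop: repeated left-to-right passes that each drop every adjacent equal pair met, stopping when a pass removes nothing.
import Mathlib
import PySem

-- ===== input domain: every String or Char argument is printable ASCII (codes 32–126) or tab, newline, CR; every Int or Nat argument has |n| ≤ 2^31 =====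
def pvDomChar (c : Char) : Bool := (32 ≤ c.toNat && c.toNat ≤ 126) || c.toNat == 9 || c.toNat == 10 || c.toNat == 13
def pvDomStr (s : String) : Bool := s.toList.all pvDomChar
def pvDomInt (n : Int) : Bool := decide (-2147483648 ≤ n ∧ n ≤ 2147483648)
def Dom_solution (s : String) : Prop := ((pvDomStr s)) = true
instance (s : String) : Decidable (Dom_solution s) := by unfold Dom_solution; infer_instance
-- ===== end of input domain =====

-- B replaces A's one-pass stack with a fixpoint loop of repeated passes, each deleting adjacent equal pairs (alternative algorithm, not faster).

-- ===== PORT A =====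
-- A's helper `check`: Python list with append/pop at the END (stk[-1] = last element).
def check (stk : List Char) (ch : Char) : List Char :=
  if stk = [] then stk ++ [ch]
  else if stk.getLast? = some ch then stk.dropLast
  else if stk.getLast? ≠ some ch then stk ++ [ch]
  else stk

def solution (s : String) : Int :=
  let stk := s.toList.foldl (fun stk i => check stk i) []
  let ans : Int := if stk = [] then (1 : Int) else 0
  ans

-- ===== PORT B =====
-- inner while loop of Source B: one left-to-right pass; on chars[i] = chars[i+1] skip both (deleting the
-- pair) and set changed, else emit chars[i]; the index walk becomes the structural recursion.
def pass1 : List Char → List Char × Bool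
  | a :: b :: t =>
    if a = b then ((pass1 t).1, true)
    else (a :: (pass1 (b :: t)).1, (pass1 (b :: t)).2)
  | l => (l, false)

-- length facts the outer loop's termination needs
theorem pass1_len_le : ∀ l : List Char, (pass1 l).1.length ≤ l.length
  | [] => by simp [pass1]
  | [a] => by simp [pass1]
  | a :: b :: t => by
    by_cases hab : a = b
    · simp only [pass1, if_pos hab]
      have := pass1_len_le t; simp; omega
    · simp only [pass1, if_neg hab]
      have := pass1_len_le (b :: t); simp at this ⊢; omega

theorem pass1_true_lt : ∀ l : List Char, (pass1 l).2 = true → (pass1 l).1.length < l.length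
  | [] => by simp [pass1]
  | [a] => by simp [pass1]
  | a :: b :: t => by
    by_cases hab : a = b
    · simp only [pass1, if_pos hab]
      intro _
      have := pass1_len_le t; simp; omega
    · simp only [pass1, if_neg hab]
      intro h
      have := pass1_true_lt (b :: t) h; simp at this ⊢; omega

-- outer while loop: repeat the pass until one deletes nothing
def fixLoop (chars : List Char) : List Char :=
  let r := pass1 chars
  if h2 : r.2 = true then fixLoop r.1 else r.1
termination_by chars.length
decreasing_by exact pass1_true_lt chars h2

def solution_alt (s : String) : Int :=
  let chars := fixLoop s.toList
  if chars = [] then (1 : Int) else 0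

-- ===== PRECONDITION & SPEC =====
def Spec_solution (s : String) (out : Int) : Prop := out = solution_alt s
instance (s : String) (out : Int) : Decidable (Spec_solution s out) := by unfold Spec_solution; infer_instance

-- ===== CLAIM (what is proved, stated in full; the proofs are below) =====
def Claim_equal_solution : Prop := ∀ (s : String), Dom_solution s → Spec_solution s (solution s)

-- ===== LEMMAS AND PROOFS =====

-- head-at-top model of A's stack
def step (st : List Char) (c : Char) : List Char :=
  match st with
  | [] => [c]
  | t :: r => if t = c then r else c :: t :: r

def srun (l : List Char) : List Char := l.foldl step []

theorem check_eq_step (stk : List Char) (ch : Char) :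
    check stk ch = (step stk.reverse ch).reverse := by
  cases h : stk.reverse with
  | nil => simp_all [check, step, List.reverse_eq_nil_iff.mp h]
  | cons t r =>
    have hstk : stk = r.reverse ++ [t] := by
      have := congrArg List.reverse h; simpa using this
    subst hstk
    by_cases htc : t = ch <;> simp [check, step, htc, List.getLast?_append]

theorem foldl_check_eq (l : List Char) (stk : List Char) :
    l.foldl (fun stk i => check stk i) stk = (l.foldl step stk.reverse).reverse := by
  induction l generalizing stk with
  | nil => simp
  | cons c l ih =>
    rw [List.foldl_cons, ih, check_eq_step, List.reverse_reverse, List.foldl_cons]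

def NoAdj (l : List Char) : Prop := l.IsChain (· ≠ ·)

theorem step_noadj {st : List Char} (h : NoAdj st) (c : Char) : NoAdj (step st c) := by
  cases st with
  | nil => simp [step, NoAdj]
  | cons t r =>
    unfold NoAdj step at *
    by_cases htc : t = c
    · simp only [if_pos htc]
      exact (List.isChain_cons.mp h).2
    · simp only [if_neg htc]
      exact List.isChain_cons_cons.mpr ⟨Ne.symm htc, h⟩

theorem step_step_cancel {st : List Char} (h : NoAdj st) (c : Char) :
    step (step st c) c = st := by
  cases st with
  | nil => simp [step]
  | cons t r =>
    by_cases htc : t = c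
    · subst htc
      cases r with
      | nil => simp [step]
      | cons b r' =>
        have hb : t ≠ b := (List.isChain_cons_cons.mp h).1
        simp [step, Ne.symm hb]
    · simp [step, htc]

-- one pass of B preserves the stack run (each deleted pair cancels on the stack)
theorem pass1_foldl : ∀ (l st : List Char), NoAdj st →
    ((pass1 l).1).foldl step st = l.foldl step st
  | [], st, _ => rfl
  | [a], st, _ => rfl
  | a :: b :: t, st, h => by
    by_cases hab : a = b
    · simp only [pass1, if_pos hab]
      subst hab
      rw [pass1_foldl t st h, List.foldl_cons, List.foldl_cons, step_step_cancel h a]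
    · simp only [pass1, if_neg hab]
      rw [List.foldl_cons, List.foldl_cons,
        pass1_foldl (b :: t) (step st a) (step_noadj h a)]

-- a pass that deletes nothing certifies there is no adjacent equal pair
theorem pass1_false : ∀ l : List Char, (pass1 l).2 = false → (pass1 l).1 = l ∧ NoAdj l
  | [] => by intro _; exact ⟨rfl, List.IsChain.nil⟩
  | [a] => by intro _; exact ⟨rfl, List.IsChain.singleton a⟩
  | a :: b :: t => by
    by_cases hab : a = b
    · simp only [pass1, if_pos hab]
      intro h; cases h
    · simp only [pass1, if_neg hab]
      intro h
      obtain ⟨h1, h2⟩ := pass1_false (b :: t) h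
      exact ⟨by rw [h1], List.isChain_cons_cons.mpr ⟨hab, h2⟩⟩

theorem fixLoop_good (chars : List Char) :
    srun (fixLoop chars) = srun chars ∧ NoAdj (fixLoop chars) := by
  rw [fixLoop]
  by_cases h2 : (pass1 chars).2 = true
  · simp only [h2, dif_pos]
    have ih := fixLoop_good (pass1 chars).1
    refine ⟨?_, ih.2⟩
    rw [ih.1]
    exact pass1_foldl chars [] List.IsChain.nil
  · simp only [h2]
    have := pass1_false chars (by simpa using h2)
    rw [this.1]
    exact ⟨rfl, this.2⟩
termination_by chars.length
decreasing_by exact pass1_true_lt chars h2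

-- on a list with no adjacent equal pair, the stack run just reverses the list
theorem foldl_step_of_noadj (l : List Char) : ∀ st : List Char, NoAdj (st.reverse ++ l) →
    l.foldl step st = l.reverse ++ st := by
  induction l with
  | nil => intro st _; simp
  | cons c l ih =>
    intro st h
    cases st with
    | nil =>
      simp only [List.foldl_cons, step]
      rw [ih [c] (by simpa using h)]; simp
    | cons t r =>
      have htc : t ≠ c := by
        have hu : List.IsChain (· ≠ ·) ((t :: r).reverse ++ c :: l) := h
        obtain ⟨_, _, hj⟩ := List.isChain_append.mp hu
        exact hj t (by simp) c (by simp)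
      simp only [List.foldl_cons, step, if_neg htc]
      rw [ih (c :: t :: r) (by simpa using h)]; simp

theorem srun_of_noadj (l : List Char) (h : NoAdj l) : srun l = l.reverse := by
  simpa [srun] using foldl_step_of_noadj l [] (by simpa using h)

-- ===== VERDICT (by name: the statement is the Claim_ definition above) =====
theorem solution_spec : Claim_equal_solution := by
  intro s _
  unfold Spec_solution solution solution_alt
  have hg := fixLoop_good s.toList
  have key : s.toList.foldl (fun stk i => check stk i) [] = fixLoop s.toList := by
    rw [foldl_check_eq]
    have h1 : (fixLoop s.toList).reverse = srun s.toList := by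
      rw [← hg.1, srun_of_noadj _ hg.2]
    simp only [srun] at h1
    simp only [List.reverse_nil]
    rw [← h1, List.reverse_reverse]
  simp only [key]
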